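-- pv_equiv track=rewrite | github.com/alepulver/game-catalog-builder | game_catalog_builder/utils/consistency.py | platform_outlier_tags
-- ===== SOURCE A (Python) =====
-- def platform_outlier_tags(platforms: dict[str, set[str]]) -> list[str]:
--     """
--     Produce symmetric `platform_outlier:<provider>` tags relative to a strict-majority platform
--     consensus (computed per platform bucket).
--     """
--     present = [p for p, s in platforms.items() if s]
--     if len(present) < 2:
--         return []
--
--     # Count each platform bucket across providers.
--     counts: dict[str, int] = {}
--     for p in present:
--         for bucket in platforms[p]:
--             counts[bucket] = counts.get(bucket, 0) + 1
--
--     consensus = {b for b, c in counts.items() if c > len(present) / 2}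
--     if not consensus:
--         return ["platform_no_consensus"]
--
--     out: list[str] = []
--     for p in present:
--         if platforms[p].isdisjoint(consensus):
--             out.append(f"platform_outlier:{p}")
--     return out
-- ===== SOURCE B (Python) =====
-- def platform_outlier_tags(platforms: dict[str, set[str]]) -> list[str]:
--     present = [p for p, s in platforms.items() if s]
--     if len(present) < 2:
--         return []
--
--     # Inverted index: bucket -> set of present providers containing it.
--     index: dict[str, set[str]] = {}
--     for p in present:
--         for b in platforms[p]:
--             index.setdefault(b, set()).add(p)
--
--     consensus = [b for b, ps in index.items() if 2 * len(ps) > len(present)]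
--     if not consensus:
--         return ["platform_no_consensus"]
--
--     covered: set[str] = set()
--     for b in consensus:
--         covered |= index[b]
--     return [f"platform_outlier:{p}" for p in present if p not in covered]
-- ===== Notes on version B (the rewrite author's own statement) =====
-- stated objective: alternative
-- what changed: B builds an inverted index bucket->set of providers instead of A's bucket counter, takes the consensus buckets from that index, and finds outliers as the complement of the union of the consensus buckets' provider sets, instead of A's per-provider disjointness test against the consensus set.
import Mathlib
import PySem

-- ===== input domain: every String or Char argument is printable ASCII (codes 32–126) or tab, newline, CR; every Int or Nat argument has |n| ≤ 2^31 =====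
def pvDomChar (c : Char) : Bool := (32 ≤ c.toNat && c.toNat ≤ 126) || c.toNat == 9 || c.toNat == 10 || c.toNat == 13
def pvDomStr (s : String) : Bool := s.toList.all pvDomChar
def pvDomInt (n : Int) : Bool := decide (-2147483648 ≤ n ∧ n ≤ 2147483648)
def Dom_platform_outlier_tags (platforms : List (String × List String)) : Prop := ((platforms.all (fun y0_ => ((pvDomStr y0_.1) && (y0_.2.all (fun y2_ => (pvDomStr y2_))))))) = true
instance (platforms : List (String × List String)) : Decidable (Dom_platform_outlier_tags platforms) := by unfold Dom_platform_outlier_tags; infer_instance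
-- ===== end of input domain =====

-- B replaces A's bucket counter + per-provider disjointness scan by an inverted index
-- bucket → provider set, taking outliers as the complement of the union of the consensus
-- buckets' provider sets (objective: alternative decomposition, same cost).

-- ===== PORT A =====
-- shared helper: Python `platforms[p]` (first-match lookup; every p looked up is a key)
def pvGetVal (platforms : List (String × List String)) (p : String) : List String :=
  match platforms with
  | [] => []
  | (k, v) :: rest => if k = p then v else pvGetVal rest p

-- shared helper: `[p for p, s in platforms.items() if s]` (identical line in A and B)
def pvPresent (platforms : List (String × List String)) : List String :=
  (platforms.filter (fun kv => !kv.2.isEmpty)).map Prod.fst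

-- `counts[bucket] = counts.get(bucket, 0) + 1` over all buckets of all present providers
def pvCountsA (platforms : List (String × List String)) (present : List String) : PySem.Dict String Int :=
  present.foldl (fun d p =>
    (pvGetVal platforms p).foldl (fun d b => d.insert b (d.getD b 0 + 1)) d) PySem.Dict.empty

-- `{b for b, c in counts.items() if c > len(present) / 2}`; on integers `c > n / 2` is `n < 2 * c`
def pvConsensusA (platforms : List (String × List String)) (present : List String) : PySem.Set String :=
  PySem.Set.ofList
    (((pvCountsA platforms present).items.filter
        (fun bc => decide ((present.length : Int) < 2 * bc.2))).map Prod.fst)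

def platform_outlier_tags (platforms : List (String × List String)) : List String :=
  if (pvPresent platforms).length < 2 then []
  else if pvConsensusA platforms (pvPresent platforms) = [] then ["platform_no_consensus"]
  else
    (pvPresent platforms).foldl (fun out p =>
      if PySem.Set.isdisjoint (pvGetVal platforms p) (pvConsensusA platforms (pvPresent platforms))
      then out ++ ["platform_outlier:" ++ p] else out) []

-- ===== PORT B =====
-- inverted index: `index.setdefault(b, set()).add(p)`: maps b to its old set with p added
-- (`d.insert b (add (d.getD b []) p)` is exactly that value; setdefault keeps position as insert does)
def pvIndexB (platforms : List (String × List String)) (present : List String) : PySem.Dict String (PySem.Set String) :=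
  present.foldl (fun d p =>
    (pvGetVal platforms p).foldl (fun d b => d.insert b (PySem.Set.add (d.getD b []) p)) d) PySem.Dict.empty

-- `[b for b, ps in index.items() if 2 * len(ps) > len(present)]`
def pvConsensusB (platforms : List (String × List String)) (present : List String) : List String :=
  ((pvIndexB platforms present).items.filter
      (fun bs => decide ((present.length : Int) < 2 * PySem.Set.len bs.2))).map Prod.fst

-- `covered = set(); for b in consensus: covered |= index[b]`
def pvCoveredB (platforms : List (String × List String)) (present : List String) : PySem.Set String :=
  (pvConsensusB platforms present).foldl
    (fun s b => PySem.Set.union s ((pvIndexB platforms present).getD b [])) PySem.Set.empty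

def platform_outlier_tags_alt (platforms : List (String × List String)) : List String :=
  if (pvPresent platforms).length < 2 then []
  else if pvConsensusB platforms (pvPresent platforms) = [] then ["platform_no_consensus"]
  else
    ((pvPresent platforms).filter
        (fun p => !PySem.Set.contains (pvCoveredB platforms (pvPresent platforms)) p)).map
      (fun p => "platform_outlier:" ++ p)

-- ===== PRECONDITION & SPEC =====
-- Pre_ is only the well-formedness of the dict[str, set[str]] encoding: dict keys and set
-- elements are distinct in Python, so no Python input is excluded.
def Pre_platform_outlier_tags (platforms : List (String × List String)) : Prop :=
  (platforms.map Prod.fst).Nodup ∧ ∀ kv ∈ platforms, kv.2.Nodup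
instance (platforms : List (String × List String)) : Decidable (Pre_platform_outlier_tags platforms) := by unfold Pre_platform_outlier_tags; infer_instance
def pvWitness_platform_outlier_tags : (List (String × List String)) :=
  [("a", ["x"]), ("b", ["x"]), ("c", ["y"])]

def Spec_platform_outlier_tags (platforms : List (String × List String)) (out : List String) : Prop := out = platform_outlier_tags_alt platforms
instance (platforms : List (String × List String)) (out : List String) : Decidable (Spec_platform_outlier_tags platforms out) := by unfold Spec_platform_outlier_tags; infer_instance

-- ===== CLAIM (what is proved, stated in full; the proofs are below) =====
def Claim_equal_platform_outlier_tags : Prop := ∀ (platforms : List (String × List String)), Dom_platform_outlier_tags platforms → Pre_platform_outlier_tags platforms → Spec_platform_outlier_tags platforms (platform_outlier_tags platforms)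

-- ===== LEMMAS AND PROOFS =====

-- the provider set of a bucket b, in `present` order
def pvOcc (platforms : List (String × List String)) (present : List String) (b : String) : List String :=
  present.filter (fun p => decide (b ∈ pvGetVal platforms p))

theorem pvGetVal_nodup (platforms : List (String × List String))
    (hv : ∀ kv ∈ platforms, kv.2.Nodup) (p : String) : (pvGetVal platforms p).Nodup := by
  induction platforms with
  | nil => simp [pvGetVal]
  | cons kv rest ih =>
    obtain ⟨k, v⟩ := kv
    simp only [pvGetVal]
    split
    · exact hv (k, v) (by simp)
    · exact ih (fun kv h => hv kv (by simp [h]))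

theorem pvPresent_nodup (platforms : List (String × List String))
    (hk : (platforms.map Prod.fst).Nodup) : (pvPresent platforms).Nodup := by
  have hsub : (pvPresent platforms).Sublist (platforms.map Prod.fst) :=
    (List.filter_sublist).map Prod.fst
  exact hk.sublist hsub

theorem pvCountsA_getD (platforms : List (String × List String))
    (hv : ∀ kv ∈ platforms, kv.2.Nodup) :
    ∀ (L : List String) (d : PySem.Dict String Int) (b : String),
      (L.foldl (fun d p =>
          (pvGetVal platforms p).foldl (fun d b => d.insert b (d.getD b 0 + 1)) d) d).getD b 0
        = d.getD b 0 + ((L.filter (fun p => decide (b ∈ pvGetVal platforms p))).length : Int) := by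
  intro L
  induction L with
  | nil => intro d b; simp
  | cons p L ih =>
    intro d b
    rw [List.foldl_cons, ih, PySem.Dict.getD_foldl_insert_add_one]
    by_cases hb : b ∈ pvGetVal platforms p
    · rw [List.count_eq_one_of_mem (pvGetVal_nodup platforms hv p) hb]
      simp only [hb, decide_true, List.filter_cons_of_pos, List.length_cons]
      push_cast
      ring
    · rw [List.count_eq_zero.mpr hb]
      simp [hb]

theorem pvIndexB_inner (p : String) :
    ∀ (l : List String) (d : PySem.Dict String (PySem.Set String)) (b : String),
      (l.foldl (fun d c => d.insert c (PySem.Set.add (d.getD c []) p)) d).getD b []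
        = if b ∈ l then PySem.Set.add (d.getD b []) p else d.getD b [] := by
  intro l
  induction l with
  | nil => intro d b; simp
  | cons c l ih =>
    intro d b
    rw [List.foldl_cons, ih, PySem.Dict.getD_insert]
    by_cases hbc : b = c
    · subst hbc
      by_cases hbl : b ∈ l <;> simp [hbl]
    · by_cases hbl : b ∈ l <;> simp [hbl, hbc]

theorem pvIndexB_getD (platforms : List (String × List String)) :
    ∀ (L : List String) (d : PySem.Dict String (PySem.Set String)) (b : String),
      (L.foldl (fun d p =>
          (pvGetVal platforms p).foldl (fun d b => d.insert b (PySem.Set.add (d.getD b []) p)) d) d).getD b []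
        = (L.filter (fun p => decide (b ∈ pvGetVal platforms p))).foldl PySem.Set.add (d.getD b []) := by
  intro L
  induction L with
  | nil => intro d b; simp
  | cons p L ih =>
    intro d b
    rw [List.foldl_cons, ih, pvIndexB_inner]
    by_cases hb : b ∈ pvGetVal platforms p <;> simp [hb]

theorem pvIndexB_getD_occ (platforms : List (String × List String)) (present : List String)
    (hp : present.Nodup) (b : String) :
    (pvIndexB platforms present).getD b [] = pvOcc platforms present b := by
  rw [pvIndexB, pvIndexB_getD, PySem.Dict.getD_empty, ← PySem.Set.ofList_eq_foldl]
  exact PySem.Set.ofList_eq_self_of_nodup _ (hp.filter _)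

theorem pvCountsA_getD_occ (platforms : List (String × List String)) (present : List String)
    (hv : ∀ kv ∈ platforms, kv.2.Nodup) (b : String) :
    (pvCountsA platforms present).getD b 0 = ((pvOcc platforms present b).length : Int) := by
  rw [pvCountsA, pvCountsA_getD platforms hv, PySem.Dict.getD_empty, pvOcc]
  ring

-- both nested insert loops produce the same key list
theorem pv_keys_nested {ν : Type} (platforms : List (String × List String))
    (f : PySem.Dict String ν → String → String → ν) :
    ∀ (L : List String) (d : PySem.Dict String ν),
      (L.foldl (fun d p =>
          (pvGetVal platforms p).foldl (fun d b => d.insert b (f d p b)) d) d).keys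
        = L.foldl (fun ks p => PySem.Set.update ks (pvGetVal platforms p)) d.keys := by
  intro L
  induction L with
  | nil => intro d; simp
  | cons p L ih =>
    intro d
    rw [List.foldl_cons, ih, List.foldl_cons, PySem.Dict.keys_foldl_insert]

theorem pv_keys_nested_nodup {ν : Type} (platforms : List (String × List String))
    (f : PySem.Dict String ν → String → String → ν) :
    ∀ (L : List String) (d : PySem.Dict String ν), d.keys.Nodup →
      (L.foldl (fun d p =>
          (pvGetVal platforms p).foldl (fun d b => d.insert b (f d p b)) d) d).keys.Nodup := by
  intro L
  induction L with
  | nil => intro d h; simpa using h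
  | cons p L ih =>
    intro d h
    rw [List.foldl_cons]
    exact ih _ (PySem.Dict.nodup_keys_foldl_insert _ _ _ h)

theorem pvConsensus_eq (platforms : List (String × List String)) (present : List String)
    (hp : present.Nodup) (hv : ∀ kv ∈ platforms, kv.2.Nodup) :
    pvConsensusA platforms present = pvConsensusB platforms present := by
  have hkA : (pvCountsA platforms present).keys.Nodup := by
    rw [pvCountsA]
    exact pv_keys_nested_nodup platforms (fun d _ b => d.getD b 0 + 1) present PySem.Dict.empty (by simp)
  have hkB : (pvIndexB platforms present).keys.Nodup := by
    rw [pvIndexB]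
    exact pv_keys_nested_nodup platforms (fun d p b => PySem.Set.add (d.getD b []) p) present PySem.Dict.empty (by simp)
  have hkeys : (pvCountsA platforms present).keys = (pvIndexB platforms present).keys := by
    rw [pvCountsA, pvIndexB,
      pv_keys_nested platforms (fun d _ b => d.getD b 0 + 1),
      pv_keys_nested platforms (fun d p b => PySem.Set.add (d.getD b []) p)]
    rfl
  rw [pvConsensusA, pvConsensusB,
    PySem.Dict.items_eq_map_keys _ hkA 0, PySem.Dict.items_eq_map_keys _ hkB [],
    List.filter_map, List.filter_map, List.map_map, List.map_map]
  have hmapA : (Prod.fst ∘ fun k => (k, (pvCountsA platforms present).getD k 0)) = id := rfl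
  have hmapB : (Prod.fst ∘ fun k => (k, (pvIndexB platforms present).getD k [])) = id := rfl
  rw [hmapA, hmapB, List.map_id, List.map_id, hkeys]
  rw [PySem.Set.ofList_eq_self_of_nodup _ (hkB.filter _)]
  apply List.filter_congr
  intro b _
  simp only [Function.comp_apply]
  rw [pvCountsA_getD_occ platforms present hv, pvIndexB_getD_occ platforms present hp,
    PySem.Set.len]

theorem pv_mem_foldl_union (f : String → List String) :
    ∀ (L : List String) (s : PySem.Set String) (x : String),
      x ∈ L.foldl (fun s b => PySem.Set.union s (f b)) s ↔ x ∈ s ∨ ∃ b ∈ L, x ∈ f b := by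
  intro L
  induction L with
  | nil => intro s x; simp
  | cons b L ih =>
    intro s x
    rw [List.foldl_cons, ih, PySem.Set.mem_union]
    constructor
    · rintro ((h | h) | ⟨c, hc, hx⟩)
      · exact Or.inl h
      · exact Or.inr ⟨b, by simp, h⟩
      · exact Or.inr ⟨c, by simp [hc], hx⟩
    · rintro (h | ⟨c, hc, hx⟩)
      · exact Or.inl (Or.inl h)
      · rcases List.mem_cons.mp hc with h1 | h1
        · subst h1; exact Or.inl (Or.inr hx)
        · exact Or.inr ⟨c, h1, hx⟩

theorem pv_mem_covered (platforms : List (String × List String)) (present : List String)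
    (hp : present.Nodup) (x : String) :
    x ∈ pvCoveredB platforms present
      ↔ ∃ b ∈ pvConsensusB platforms present, x ∈ present ∧ b ∈ pvGetVal platforms x := by
  rw [pvCoveredB, pv_mem_foldl_union]
  simp only [PySem.Set.empty, List.not_mem_nil, false_or]
  constructor
  · rintro ⟨b, hb, hx⟩
    rw [pvIndexB_getD_occ platforms present hp, pvOcc, List.mem_filter] at hx
    exact ⟨b, hb, hx.1, by simpa using hx.2⟩
  · rintro ⟨b, hb, hxp, hbx⟩
    refine ⟨b, hb, ?_⟩
    rw [pvIndexB_getD_occ platforms present hp, pvOcc, List.mem_filter]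
    exact ⟨hxp, by simpa using hbx⟩

theorem pv_filter_pred_eq (platforms : List (String × List String))
    (hp : (pvPresent platforms).Nodup) (p : String) (hpP : p ∈ pvPresent platforms) :
    PySem.Set.isdisjoint (pvGetVal platforms p) (pvConsensusB platforms (pvPresent platforms))
      = !PySem.Set.contains (pvCoveredB platforms (pvPresent platforms)) p := by
  rw [Bool.eq_iff_iff, Bool.not_eq_true', ← Bool.not_eq_true, PySem.Set.isdisjoint_iff,
    PySem.Set.contains_iff, pv_mem_covered platforms (pvPresent platforms) hp]
  constructor
  · rintro h ⟨b, hbC, _, hbp⟩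
    exact h b hbp hbC
  · intro h b hbp hbC
    exact h ⟨b, hbC, hpP, hbp⟩

-- ===== VERDICT (by name: the statement is the Claim_ definition above) =====
theorem platform_outlier_tags_spec : Claim_equal_platform_outlier_tags := by
  intro platforms _ hpre
  obtain ⟨hk, hv⟩ := hpre
  have hp : (pvPresent platforms).Nodup := pvPresent_nodup platforms hk
  have hcons := pvConsensus_eq platforms (pvPresent platforms) hp hv
  unfold Spec_platform_outlier_tags platform_outlier_tags platform_outlier_tags_alt
  rw [hcons]
  by_cases h2 : (pvPresent platforms).length < 2
  · simp [h2]
  · simp only [h2, if_false]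
    by_cases hC : pvConsensusB platforms (pvPresent platforms) = []
    · simp [hC]
    · simp only [hC, if_false]
      rw [PySem.List.foldl_append_if
        (fun p => PySem.Set.isdisjoint (pvGetVal platforms p) (pvConsensusB platforms (pvPresent platforms)))
        (fun p => "platform_outlier:" ++ p), List.nil_append]
      congr 1
      apply List.filter_congr
      intro p hpP
      exact pv_filter_pred_eq platforms hp p hpP
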